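-- pv_equiv track=rewrite | github.com/GoldenJaden/ITMO-study | Algorythms/Semester 2/Lab 2 Hash/division.py | hash_division
-- ===== SOURCE A (Python) =====
-- def hash_division(keys):
--     n = len(keys)
--     hash_table = [None for i in range(n)]
--     for i in range(n):
--         if hash_table[keys[i] % n] is None:
--             hash_table[keys[i] % n] = [keys[i]]
--         else:
--             hash_table[keys[i] % n].append(keys[i])
--     return hash_table
-- ===== SOURCE B (Python) =====
-- def hash_division(keys):
--     n = len(keys)
--     return [([k for k in keys if k % n == i] or None) for i in range(n)]
-- ===== Notes on version B (the rewrite author's own statement) =====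
-- stated objective: simpler
-- what changed: B builds each slot independently by filtering the whole key list for keys hashing to that slot ('[k for k in keys if k % n == i] or None'), a per-bucket scan with no mutable table at all, instead of A's single pass mutating a pre-built None list in place.
import Mathlib
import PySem

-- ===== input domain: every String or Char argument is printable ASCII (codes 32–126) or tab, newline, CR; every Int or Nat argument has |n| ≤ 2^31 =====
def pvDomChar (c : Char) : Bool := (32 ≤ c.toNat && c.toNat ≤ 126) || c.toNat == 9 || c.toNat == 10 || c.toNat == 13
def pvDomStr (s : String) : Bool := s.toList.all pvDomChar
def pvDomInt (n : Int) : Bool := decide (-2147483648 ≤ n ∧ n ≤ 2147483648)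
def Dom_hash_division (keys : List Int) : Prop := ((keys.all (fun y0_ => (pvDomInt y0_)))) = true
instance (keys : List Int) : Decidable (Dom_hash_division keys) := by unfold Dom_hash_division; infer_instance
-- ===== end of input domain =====

-- B builds each slot by filtering the whole key list (no mutable table); simpler decomposition, not faster.


-- ===== PORT A =====
-- transliteration of A: pre-built list of None, one pass over range(n) assigning/appending in place
def hash_division (keys : List Int) : List (Option (List Int)) :=
  let n : Int := keys.length
  let hash_table : List (Option (List Int)) := (PySem.List.pyRange 0 n 1).map (fun _ => none)
  (PySem.List.pyRange 0 n 1).foldl (fun table i =>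
    let k := PySem.List.pyGetD keys i 0
    let h := PySem.Int.mod k n
    if PySem.List.pyGetD table h none = none then
      PySem.List.pySetD table h (some [k])
    else
      PySem.List.pySetD table h (some ((PySem.List.pyGetD table h none).getD [] ++ [k]))) hash_table

-- ===== PORT B =====
-- transliteration of B: for each slot i, filter the keys hashing to i ('or None' = none when empty)
def hash_division_alt (keys : List Int) : List (Option (List Int)) :=
  let n : Int := keys.length
  (PySem.List.pyRange 0 n 1).map (fun i =>
    let b := keys.filter (fun k => PySem.Int.mod k n == i)
    if b = [] then none else some b)

-- ===== PRECONDITION & SPEC =====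
def Spec_hash_division (keys : List Int) (out : List (Option (List Int))) : Prop := out = hash_division_alt keys
instance (keys : List Int) (out : List (Option (List Int))) : Decidable (Spec_hash_division keys out) := by unfold Spec_hash_division; infer_instance

-- ===== CLAIM (what is proved, stated in full; the proofs are below) =====
def Claim_equal_hash_division : Prop := ∀ (keys : List Int), Dom_hash_division keys → Spec_hash_division keys (hash_division keys)

-- ===== LEMMAS AND PROOFS =====

-- A's step function, on the key value (after folding the range-indexing away)
def stepA (m : Int) (table : List (Option (List Int))) (k : Int) : List (Option (List Int)) :=
  if PySem.List.pyGetD table (PySem.Int.mod k m) none = none then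
    PySem.List.pySetD table (PySem.Int.mod k m) (some [k])
  else
    PySem.List.pySetD table (PySem.Int.mod k m)
      (some ((PySem.List.pyGetD table (PySem.Int.mod k m) none).getD [] ++ [k]))

-- encoding of a bucket as A stores it: empty bucket = none
def enc (l : List Int) : Option (List Int) := if l = [] then none else some l

lemma set_eq_map_range (m : Int) (g : Int → Option (List Int)) (h : Int)
    (h0 : 0 ≤ h) (_h1 : h < m) (v : Option (List Int)) :
    PySem.List.pySetD ((PySem.List.pyRange 0 m 1).map g) h v
      = (PySem.List.pyRange 0 m 1).map (fun i => if i = h then v else g i) := by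
  rw [PySem.List.pySetD_of_nonneg _ v h0]
  apply List.ext_getElem
  · simp
  · intro j hj hj'
    simp only [List.length_set, List.length_map, PySem.List.length_pyRange_one] at hj
    rw [List.getElem_set]
    simp only [List.getElem_map, PySem.List.getElem_pyRange_one]
    split_ifs with h2 h3 h3
    · rfl
    · omega
    · omega
    · rfl

lemma stepA_enc (m : Int) (hm : 0 < m) (g : Int → List Int) (k : Int) :
    stepA m ((PySem.List.pyRange 0 m 1).map (fun i => enc (g i))) k
      = (PySem.List.pyRange 0 m 1).map
          (fun i => enc (g i ++ if PySem.Int.mod k m = i then [k] else [])) := by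
  unfold stepA
  have h0 : 0 ≤ PySem.Int.mod k m := PySem.Int.mod_nonneg k hm
  have h1 : PySem.Int.mod k m < m := PySem.Int.mod_lt k hm
  rw [PySem.List.pyGetD_map_pyRange_of_nonneg _ m _ none h0 h1]
  by_cases hc : g (PySem.Int.mod k m) = []
  · rw [if_pos (by simp [enc, hc]), set_eq_map_range m _ _ h0 h1]
    apply List.map_congr_left
    intro i _
    by_cases hi : i = PySem.Int.mod k m
    · simp [hi, enc, hc]
    · simp [hi, enc, Ne.symm hi]
  · rw [if_neg (by simp [enc, hc]), set_eq_map_range m _ _ h0 h1]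
    apply List.map_congr_left
    intro i _
    by_cases hi : i = PySem.Int.mod k m
    · simp [hi, enc, hc]
    · simp [hi, enc, Ne.symm hi]

lemma fold_enc (m : Int) (hm : 0 < m) (l : List Int) (g : Int → List Int) :
    l.foldl (stepA m) ((PySem.List.pyRange 0 m 1).map (fun i => enc (g i)))
      = (PySem.List.pyRange 0 m 1).map
          (fun i => enc (g i ++ l.filter (fun k => PySem.Int.mod k m == i))) := by
  induction l generalizing g with
  | nil => simp
  | cons x xs ih =>
      simp only [List.foldl_cons]
      rw [stepA_enc m hm g x,
        ih (fun i => g i ++ if PySem.Int.mod x m = i then [x] else [])]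
      apply List.map_congr_left
      intro i _
      by_cases hx : PySem.Int.mod x m = i <;>
        simp [hx, List.append_assoc]

-- ===== VERDICT (by name: the statement is the Claim_ definition above) =====
theorem hash_division_spec : Claim_equal_hash_division := by
  intro keys _
  unfold Spec_hash_division hash_division hash_division_alt
  rcases keys with _ | ⟨a, as⟩
  · rfl
  · set keys := a :: as with hkeys
    have hm : (0:Int) < (keys.length : Int) := by simp [hkeys]
    show (PySem.List.pyRange 0 (keys.length : Int) 1).foldl
        (fun table i => stepA (keys.length : Int) table (PySem.List.pyGetD keys i 0))
        ((PySem.List.pyRange 0 (keys.length : Int) 1).map (fun _ => none))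
      = (PySem.List.pyRange 0 (keys.length : Int) 1).map
        (fun i =>
          let b := keys.filter (fun k => PySem.Int.mod k (keys.length : Int) == i)
          if b = [] then none else some b)
    rw [PySem.List.foldl_pyRange_zero_pyGetD']
    have hinit : ((PySem.List.pyRange 0 (keys.length : Int) 1).map
        (fun _ => (none : Option (List Int))))
        = (PySem.List.pyRange 0 (keys.length : Int) 1).map
          (fun i => enc ((fun _ => ([] : List Int)) i)) := by
      simp [enc]
    rw [hinit, fold_enc _ hm]
    simp [enc]
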